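-- pv_equiv track=rewrite | github.com/lofty1337/discretemath | lab6/lab6.py | build_incidence_matrix
-- ===== SOURCE A (Python) =====
-- def build_incidence_matrix(edges):
--     # Находим количество вершин и ребер в графе
--     num_vertices = max(max(edge[0], edge[1]) for edge in edges) + 1
--     num_edges = len(edges)
--
--     # Создаем пустую матрицу инцидентности
--     incidence_matrix = [[0] * num_edges for _ in range(num_vertices)]
--
--     # Заполняем матрицу инцидентности
--     for i, edge in enumerate(edges):
--         start_vertex, end_vertex, weight = edge[0], edge[1], edge[2]
--         incidence_matrix[start_vertex][i] = weight
--         incidence_matrix[end_vertex][i] = -weight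
--
--     return incidence_matrix
-- ===== SOURCE B (Python) =====
-- def build_incidence_matrix(edges):
--     # Column-per-edge construction followed by a transpose, instead of
--     # scattering into a preallocated row-major grid.
--     num_vertices = max(max(e[0], e[1]) for e in edges) + 1
--     columns = []
--     for e in edges:
--         col = [0] * num_vertices
--         col[e[0]] = e[2]
--         col[e[1]] = -e[2]
--         columns.append(col)
--     return [list(row) for row in zip(*columns)]
-- ===== Notes on version B (the rewrite author's own statement) =====
-- stated objective: alternative
-- what changed: B builds one signed column vector per edge and transposes the column list into rows, instead of preallocating a row-major num_vertices x num_edges grid and scattering entries into it.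
import Mathlib
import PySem

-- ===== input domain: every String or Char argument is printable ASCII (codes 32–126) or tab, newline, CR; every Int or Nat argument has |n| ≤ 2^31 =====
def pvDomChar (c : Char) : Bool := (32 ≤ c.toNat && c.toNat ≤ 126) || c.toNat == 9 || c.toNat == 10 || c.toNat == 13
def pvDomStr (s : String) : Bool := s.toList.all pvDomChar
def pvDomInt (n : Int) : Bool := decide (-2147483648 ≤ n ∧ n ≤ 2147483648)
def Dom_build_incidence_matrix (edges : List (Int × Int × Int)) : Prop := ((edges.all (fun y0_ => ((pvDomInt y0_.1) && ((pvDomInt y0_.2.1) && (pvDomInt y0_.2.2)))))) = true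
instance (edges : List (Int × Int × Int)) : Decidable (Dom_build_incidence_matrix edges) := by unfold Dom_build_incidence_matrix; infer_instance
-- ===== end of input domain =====

-- B builds one signed column per edge and transposes the column list into rows,
-- instead of scattering entries into a preallocated row-major grid (objective: alternative).

-- ===== PORT A =====
-- Literal port of A: max over a generator, a preallocated num_vertices × num_edges
-- zero grid, then a scatter loop over enumerate(edges).  Python's in-place
-- 'matrix[v][i] = w' is ported as fetch-row / set-cell / store-row, which is the
-- same value since the rows of the list comprehension are independent lists.
def build_incidence_matrix (edges : List (Int × Int × Int)) : List (List Int) :=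
  match PySem.List.max? (edges.map (fun e => max e.1 e.2.1)) (fun x => x) with
  | none => []   -- Python: ValueError on empty 'edges' (excluded by Pre_)
  | some m =>
    let num_vertices : Int := m + 1
    let num_edges := edges.length
    let init : List (List Int) :=
      (PySem.List.pyRange 0 num_vertices 1).map (fun _ => List.replicate num_edges (0:Int))
    (PySem.List.enumerate edges 0).foldl
      (fun mat ie =>
        let row := PySem.List.pyGetD mat ie.2.1 []
        let mat := PySem.List.pySetD mat ie.2.1 (PySem.List.pySetD row ie.1 ie.2.2.2)
        let row2 := PySem.List.pyGetD mat ie.2.2.1 []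
        PySem.List.pySetD mat ie.2.2.1 (PySem.List.pySetD row2 ie.1 (-ie.2.2.2)))
      init

-- ===== PORT B =====
-- Literal port of B: same max, then one column per edge, then the transpose
-- '[list(r) for r in zip(*columns)]'.  Since every column has length
-- num_vertices and (under Pre_) columns is nonempty, zip(*columns) yields
-- exactly num_vertices rows, row j collecting entry j of each column.
def build_incidence_matrix_alt (edges : List (Int × Int × Int)) : List (List Int) :=
  match PySem.List.max? (edges.map (fun e => max e.1 e.2.1)) (fun x => x) with
  | none => []   -- Python: ValueError on empty 'edges' (excluded by Pre_)
  | some m =>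
    let num_vertices : Int := m + 1
    let columns : List (List Int) :=
      edges.map (fun e =>
        let col := List.replicate num_vertices.toNat (0:Int)
        let col := PySem.List.pySetD col e.1 e.2.2
        PySem.List.pySetD col e.2.1 (-e.2.2))
    (List.range num_vertices.toNat).map (fun j => columns.map (fun c => c.getD j 0))

-- ===== PRECONDITION & SPEC =====
-- the largest vertex index occurring in edges (0 on the empty list, unused there)
def pvMaxVert : List (Int × Int × Int) → Int
  | [] => 0
  | e :: es => es.foldl (fun a f => max a (max f.1 f.2.1)) (max e.1 e.2.1)

-- Pre_ excludes exactly the inputs on which A raises: empty 'edges' (ValueError from max)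
-- and edges whose endpoint is below -(max_vertex+1) (IndexError).  Python's in-range
-- negative endpoints (wraparound) stay inside Pre_ and are proved equal.
def Pre_build_incidence_matrix (edges : List (Int × Int × Int)) : Prop :=
  edges ≠ [] ∧ ∀ e ∈ edges, -(pvMaxVert edges + 1) ≤ e.1 ∧ -(pvMaxVert edges + 1) ≤ e.2.1
instance (edges : List (Int × Int × Int)) : Decidable (Pre_build_incidence_matrix edges) := by
  unfold Pre_build_incidence_matrix; infer_instance

def pvWitness_build_incidence_matrix : (List (Int × Int × Int)) := [(0, 2, 5), (2, 1, -3), (-1, 0, 7)]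

def Spec_build_incidence_matrix (edges : List (Int × Int × Int)) (out : List (List Int)) : Prop := out = build_incidence_matrix_alt edges
instance (edges : List (Int × Int × Int)) (out : List (List Int)) : Decidable (Spec_build_incidence_matrix edges out) := by unfold Spec_build_incidence_matrix; infer_instance

-- ===== CLAIM (what is proved, stated in full; the proofs are below) =====
def Claim_equal_build_incidence_matrix : Prop := ∀ (edges : List (Int × Int × Int)), Dom_build_incidence_matrix edges → Pre_build_incidence_matrix edges → Spec_build_incidence_matrix edges (build_incidence_matrix edges)

-- ===== LEMMAS AND PROOFS =====

-- the row index Python's xs[i] / xs[i]=v actually touches, for -n ≤ i < n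
def pvIdx (n : Nat) (i : Int) : Nat := if 0 ≤ i then i.toNat else n - (-i).toNat

-- the value edge e contributes at row j (end-vertex write happens last)
def pvColFun (n : Nat) (e : Int × Int × Int) (j : Nat) : Int :=
  if pvIdx n e.2.1 = j then -e.2.2 else if pvIdx n e.1 = j then e.2.2 else 0

-- the effect of processing one enumerated edge on a single row j of A's matrix
def pvStepRow (n : Nat) (j : Nat) (row : List Int) (ie : Int × (Int × Int × Int)) : List Int :=
  let row := if pvIdx n ie.2.1 = j then row.set ie.1.toNat ie.2.2.2 else row
  if pvIdx n ie.2.2.1 = j then row.set ie.1.toNat (-ie.2.2.2) else row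

lemma pvGetD_set {α : Type} (xs : List α) (i j : Nat) (v d : α) (hj : j < xs.length) :
    (xs.set i v).getD j d = if i = j then v else xs.getD j d := by
  simp [List.getD_eq_getElem?_getD, List.getElem?_eq_getElem hj]
  split <;> simp_all

lemma pvEnumerate_mem {α : Type} (xs : List α) (p : Int × α) (s : Int)
    (h : p ∈ PySem.List.enumerate xs s) : s ≤ p.1 ∧ p.2 ∈ xs := by
  induction xs generalizing s with
  | nil => simp [PySem.List.enumerate] at h
  | cons x t ih =>
    simp [PySem.List.enumerate] at h
    rcases h with h | h
    · simp [h]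
    · have := ih (s + 1) h; exact ⟨by omega, by simp [this.2]⟩

lemma pvIdx_lt {n : Nat} {i : Int} (h1 : -(n:Int) ≤ i) (h2 : i < n) : pvIdx n i < n := by
  unfold pvIdx; split <;> omega

lemma pyGetD_norm {α : Type} (xs : List α) (i : Int) (d : α)
    (h1 : -(xs.length:Int) ≤ i) (h2 : i < xs.length) :
    PySem.List.pyGetD xs i d = xs.getD (pvIdx xs.length i) d := by
  simp [PySem.List.pyGetD, PySem.List.pyGet?, PySem.List.pyIdx?, pvIdx]
  split
  · simp
  · simp

lemma pySetD_norm {α : Type} (xs : List α) (i : Int) (v : α)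
    (h1 : -(xs.length:Int) ≤ i) (h2 : i < xs.length) :
    PySem.List.pySetD xs i v = xs.set (pvIdx xs.length i) v := by
  simp [PySem.List.pySetD, PySem.List.pySet?, PySem.List.pyIdx?, pvIdx]
  split
  · simp
  · simp

-- a list is the range-map of its own entries
lemma self_eq_range_map (mat : List (List Int)) :
    mat = (List.range mat.length).map (fun j => mat.getD j []) := by
  apply List.ext_getElem
  · simp
  · intro j h1 h2
    simp [List.getD_eq_getElem?_getD, List.getElem?_eq_getElem h1]

-- A's scatter fold commutes with per-row decomposition
lemma foldMat (ps : List (Int × (Int × Int × Int))) (mat : List (List Int))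
    (hps : ∀ p ∈ ps, 0 ≤ p.1 ∧ (-(mat.length:Int) ≤ p.2.1 ∧ p.2.1 < mat.length)
              ∧ (-(mat.length:Int) ≤ p.2.2.1 ∧ p.2.2.1 < mat.length)) :
    ps.foldl
      (fun mat ie =>
        let row := PySem.List.pyGetD mat ie.2.1 []
        let mat := PySem.List.pySetD mat ie.2.1 (PySem.List.pySetD row ie.1 ie.2.2.2)
        let row2 := PySem.List.pyGetD mat ie.2.2.1 []
        PySem.List.pySetD mat ie.2.2.1 (PySem.List.pySetD row2 ie.1 (-ie.2.2.2)))
      mat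
    = (List.range mat.length).map (fun j => ps.foldl (pvStepRow mat.length j) (mat.getD j [])) := by
  induction ps generalizing mat with
  | nil => simpa using self_eq_range_map mat
  | cons p ps ih =>
    obtain ⟨hp0, hp1, hp2⟩ := hps p (List.mem_cons_self ..)
    have ht1 : pvIdx mat.length p.2.1 < mat.length := pvIdx_lt hp1.1 hp1.2
    have ht2 : pvIdx mat.length p.2.2.1 < mat.length := pvIdx_lt hp2.1 hp2.2
    have e_row : PySem.List.pyGetD mat p.2.1 [] = mat.getD (pvIdx mat.length p.2.1) [] :=
      pyGetD_norm _ _ _ hp1.1 hp1.2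
    have e_setrow : PySem.List.pySetD (mat.getD (pvIdx mat.length p.2.1) []) p.1 p.2.2.2
        = (mat.getD (pvIdx mat.length p.2.1) []).set p.1.toNat p.2.2.2 :=
      PySem.List.pySetD_of_nonneg _ _ hp0
    have e_matA : PySem.List.pySetD mat p.2.1
          ((mat.getD (pvIdx mat.length p.2.1) []).set p.1.toNat p.2.2.2)
        = mat.set (pvIdx mat.length p.2.1)
            ((mat.getD (pvIdx mat.length p.2.1) []).set p.1.toNat p.2.2.2) :=
      pySetD_norm _ _ _ hp1.1 hp1.2
    set matA := mat.set (pvIdx mat.length p.2.1)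
        ((mat.getD (pvIdx mat.length p.2.1) []).set p.1.toNat p.2.2.2) with hmatA
    have hlenA : matA.length = mat.length := by simp [hmatA]
    have e_row2 : PySem.List.pyGetD matA p.2.2.1 [] = matA.getD (pvIdx mat.length p.2.2.1) [] := by
      have := pyGetD_norm matA p.2.2.1 [] (by rw [hlenA]; exact hp2.1) (by rw [hlenA]; exact hp2.2)
      rwa [hlenA] at this
    have e_setrow2 : PySem.List.pySetD (matA.getD (pvIdx mat.length p.2.2.1) []) p.1 (-p.2.2.2)
        = (matA.getD (pvIdx mat.length p.2.2.1) []).set p.1.toNat (-p.2.2.2) :=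
      PySem.List.pySetD_of_nonneg _ _ hp0
    have e_mat' : PySem.List.pySetD matA p.2.2.1
          ((matA.getD (pvIdx mat.length p.2.2.1) []).set p.1.toNat (-p.2.2.2))
        = matA.set (pvIdx mat.length p.2.2.1)
            ((matA.getD (pvIdx mat.length p.2.2.1) []).set p.1.toNat (-p.2.2.2)) := by
      have := pySetD_norm matA p.2.2.1
          ((matA.getD (pvIdx mat.length p.2.2.1) []).set p.1.toNat (-p.2.2.2))
          (by rw [hlenA]; exact hp2.1) (by rw [hlenA]; exact hp2.2)
      rwa [hlenA] at this
    set mat' := matA.set (pvIdx mat.length p.2.2.1)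
        ((matA.getD (pvIdx mat.length p.2.2.1) []).set p.1.toNat (-p.2.2.2)) with hmat'
    have hlen' : mat'.length = mat.length := by simp [hmat', hlenA]
    rw [List.foldl_cons]
    simp only [e_row, e_setrow, e_matA, e_row2, e_setrow2, e_mat']
    rw [ih mat' (by
      intro q hq
      obtain ⟨q0, q1, q2⟩ := hps q (List.mem_cons_of_mem p hq)
      rw [hlen']
      exact ⟨q0, q1, q2⟩)]
    rw [hlen']
    apply List.map_congr_left
    intro j hj
    have hjn : j < mat.length := List.mem_range.mp hj
    rw [List.foldl_cons]
    congr 1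
    have gA : matA.getD j [] = if pvIdx mat.length p.2.1 = j
        then (mat.getD (pvIdx mat.length p.2.1) []).set p.1.toNat p.2.2.2
        else mat.getD j [] := pvGetD_set _ _ _ _ _ hjn
    have g' : mat'.getD j [] = if pvIdx mat.length p.2.2.1 = j
        then (matA.getD (pvIdx mat.length p.2.2.1) []).set p.1.toNat (-p.2.2.2)
        else matA.getD j [] := pvGetD_set _ _ _ _ _ (by rw [hlenA]; exact hjn)
    have gA2 : matA.getD (pvIdx mat.length p.2.2.1) [] = if pvIdx mat.length p.2.1 = pvIdx mat.length p.2.2.1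
        then (mat.getD (pvIdx mat.length p.2.1) []).set p.1.toNat p.2.2.2
        else mat.getD (pvIdx mat.length p.2.2.1) [] := pvGetD_set _ _ _ _ _ ht2
    rw [g', gA, gA2]
    simp only [pvStepRow]
    by_cases c2 : pvIdx mat.length p.2.2.1 = j <;> by_cases c1 : pvIdx mat.length p.2.1 = j <;>
      simp [c1, c2]

-- the per-row fold over enumerate fills in the row values left to right
lemma rowFold (n : Nat) (j : Nat) (es : List (Int × Int × Int)) (pre : List Int) (k : Int)
    (hk : (k:Int) = pre.length) :
    (PySem.List.enumerate es k).foldl (pvStepRow n j) (pre ++ List.replicate es.length 0)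
      = pre ++ es.map (fun e => pvColFun n e j) := by
  induction es generalizing pre k with
  | nil => simp [PySem.List.enumerate]
  | cons e t ih =>
    have hk0 : k.toNat = pre.length := by omega
    have hstep : pvStepRow n j (pre ++ List.replicate (e :: t).length 0) (k, e)
        = (pre ++ [pvColFun n e j]) ++ List.replicate t.length 0 := by
      simp only [pvStepRow, List.length_cons, List.replicate_succ, hk0, pvColFun]
      by_cases h2 : pvIdx n e.2.1 = j <;> by_cases h1 : pvIdx n e.1 = j <;>
        simp [h1, h2]
    rw [show PySem.List.enumerate (e :: t) k = (k, e) :: PySem.List.enumerate t (k + 1) from rfl,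
        List.foldl_cons, hstep, ih ((pre ++ [pvColFun n e j])) (k + 1) (by simp; omega)]
    simp

-- B's column, read at row j
lemma colRead (n : Nat) (e : Int × Int × Int) (j : Nat) (hj : j < n)
    (h1 : -(n:Int) ≤ e.1) (h2 : e.1 < n) (h3 : -(n:Int) ≤ e.2.1) (h4 : e.2.1 < n) :
    (PySem.List.pySetD (PySem.List.pySetD (List.replicate n (0:Int)) e.1 e.2.2) e.2.1 (-e.2.2)).getD j 0
      = pvColFun n e j := by
  have i1 : PySem.List.pySetD (List.replicate n (0:Int)) e.1 e.2.2
      = (List.replicate n (0:Int)).set (pvIdx n e.1) e.2.2 := by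
    rw [pySetD_norm _ _ _ (by simpa using h1) (by simpa using h2)]; simp
  rw [i1]
  have i2 : PySem.List.pySetD ((List.replicate n (0:Int)).set (pvIdx n e.1) e.2.2) e.2.1 (-e.2.2)
      = ((List.replicate n (0:Int)).set (pvIdx n e.1) e.2.2).set (pvIdx n e.2.1) (-e.2.2) := by
    rw [pySetD_norm _ _ _ (by simpa using h3) (by simpa using h4)]; simp
  rw [i2]
  rw [pvGetD_set _ _ _ _ _ (by simpa using hj), pvGetD_set _ _ _ _ _ (by simpa using hj)]
  simp [pvColFun]

lemma pvMain (e0 : Int × Int × Int) (es : List (Int × Int × Int))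
    (hv : ∀ e ∈ e0 :: es, -(pvMaxVert (e0 :: es) + 1) ≤ e.1 ∧ -(pvMaxVert (e0 :: es) + 1) ≤ e.2.1) :
    build_incidence_matrix (e0 :: es) = build_incidence_matrix_alt (e0 :: es) := by
  have hmax : PySem.List.max? ((e0 :: es).map (fun e => max e.1 e.2.1)) (fun x => x)
      = some (pvMaxVert (e0 :: es)) := by
    rw [List.map_cons, PySem.List.max?_id_cons, List.foldl_map]
    rfl
  set m := pvMaxVert (e0 :: es) with hm
  have hub : ∀ e ∈ e0 :: es, e.1 ≤ m ∧ e.2.1 ≤ m := by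
    intro e he
    have h := PySem.List.max?_isMax hmax (max e.1 e.2.1)
      (List.mem_map_of_mem he)
    exact ⟨le_trans (le_max_left _ _) h, le_trans (le_max_right _ _) h⟩
  have hm0 : 0 ≤ m := by
    have h0 := hub e0 (List.mem_cons_self ..)
    have h1 := hv e0 (List.mem_cons_self ..)
    omega
  set n := (m + 1).toNat with hn
  have hncast : (n : Int) = m + 1 := by omega
  set edges := e0 :: es with hedges
  have hL : edges.length = es.length + 1 := by simp [hedges]
  -- bounds for every edge, stated against n
  have hbnd : ∀ e ∈ edges, (-(n:Int) ≤ e.1 ∧ e.1 < n) ∧ (-(n:Int) ≤ e.2.1 ∧ e.2.1 < n) := by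
    intro e he
    have h1 := hv e he
    have h2 := hub e he
    rw [hncast]
    omega
  unfold build_incidence_matrix build_incidence_matrix_alt
  simp only [hmax]
  -- A's initial matrix is n copies of the zero row
  have hinit : (PySem.List.pyRange 0 (m + 1) 1).map (fun _ => List.replicate edges.length (0:Int))
      = List.replicate n (List.replicate edges.length (0:Int)) := by
    rw [← hncast, PySem.List.pyRange_zero_natCast, List.map_map]
    simp [Function.comp_def]
  rw [hinit]
  have hlen : (List.replicate n (List.replicate edges.length (0:Int))).length = n := by simp
  rw [foldMat (PySem.List.enumerate edges 0) _ (by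
    intro p hp
    obtain ⟨hp0, hpmem⟩ := pvEnumerate_mem edges p 0 hp
    obtain ⟨b1, b2⟩ := hbnd p.2 hpmem
    rw [hlen]
    exact ⟨hp0, b1, b2⟩)]
  rw [hlen]
  apply List.map_congr_left
  intro j hj
  have hjn : j < n := List.mem_range.mp hj
  -- row j of A's result
  have hget : (List.replicate n (List.replicate edges.length (0:Int))).getD j []
      = List.replicate edges.length (0:Int) := by
    simp [List.getD_eq_getElem?_getD, hjn]
  rw [hget]
  have hrow := rowFold n j edges ([]) 0 (by simp)
  simp only [List.nil_append] at hrow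
  rw [hrow, List.map_map]
  apply List.map_congr_left
  intro e he
  obtain ⟨⟨b1, b2⟩, b3, b4⟩ := hbnd e he
  exact (colRead n e j hjn b1 b2 b3 b4).symm

-- ===== VERDICT (by name: the statement is the Claim_ definition above) =====
theorem build_incidence_matrix_spec : Claim_equal_build_incidence_matrix := by
  intro edges _hdom hpre
  obtain ⟨hne, hv⟩ := hpre
  unfold Spec_build_incidence_matrix
  cases edges with
  | nil => exact absurd rfl hne
  | cons e0 es => exact pvMain e0 es hv
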